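-- pv_equiv track=rewrite | github.com/CsPS0/NOKIA-hackathon | drop_test/scratch.py | min_drops
-- ===== SOURCE A (Python) =====
-- import math
--
-- def min_drops(n, h):
--     d = 1
--     while True:
--         total_floors = 0
--         for i in range(1, n + 1):
--             total_floors += math.comb(d, i)
--         if total_floors >= h:
--             return d
--         d += 1
-- ===== SOURCE B (Python) =====
-- import math
--
-- def min_drops(n, h):
--     # exponential + binary search for the least d >= 1 with sum_{i=1..n} C(d,i) >= h
--     def floors(d):
--         total = 0
--         for i in range(1, n + 1):
--             total += math.comb(d, i)
--             if total >= h: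
--                 break
--         return total
--     hi = 1
--     while floors(hi) < h:
--         hi *= 2
--     lo = 1
--     while lo < hi:
--         mid = (lo + hi) // 2
--         if floors(mid) >= h:
--             hi = mid
--         else:
--             lo = mid + 1
--     return lo
-- ===== Notes on version B (the rewrite author's own statement) =====
-- stated objective: faster
-- what changed: Replaces A's linear scan d=1,2,3,... with exponential range growth followed by binary search over d, exploiting that the floor count is monotone in d.
import Mathlib
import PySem

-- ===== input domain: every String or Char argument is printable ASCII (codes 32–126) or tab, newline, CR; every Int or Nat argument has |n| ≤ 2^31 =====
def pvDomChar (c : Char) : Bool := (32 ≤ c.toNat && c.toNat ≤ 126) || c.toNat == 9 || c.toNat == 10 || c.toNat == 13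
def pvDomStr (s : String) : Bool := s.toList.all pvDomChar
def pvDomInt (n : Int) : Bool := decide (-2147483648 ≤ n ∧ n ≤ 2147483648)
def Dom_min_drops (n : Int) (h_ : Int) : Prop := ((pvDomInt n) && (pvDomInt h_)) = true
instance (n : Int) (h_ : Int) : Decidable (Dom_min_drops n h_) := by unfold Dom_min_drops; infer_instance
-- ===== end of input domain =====

-- B replaces A's linear scan over d by exponential growth + binary search (measurably
-- faster: O(log d*) instead of O(d*) evaluations of the floor sum, d* the answer),
-- and B's floor sum stops early once it reaches the threshold h.

-- port of the library call math.comb(d, i); exact for d ≥ 0, i ≥ 0 (the only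
-- arguments either program passes); equals Nat.choose (lemma pyComb_eq_choose below)
def pyComb (d i : Nat) : Nat := if d < i then 0 else d.descFactorial i / i.factorial

-- ===== PORT A =====
-- inner 'for i in range(1, n+1): total_floors += math.comb(d, i)'; the loop only
-- evaluates comb at d ≥ 1, i ≥ 1, where pyComb on toNat is exact.
def totalFloorsA (n d : Int) : Int :=
  (PySem.List.pyRange 1 (n + 1) 1).foldl
    (fun acc i => acc + ((pyComb d.toNat i.toNat : Nat) : Int)) 0

-- the 'while True: … d += 1' loop; fuel only bounds the iterations (h.toNat + 1
-- iterations always suffice on Pre_, proved below), it changes no computed value.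
def minDropsGoA (n h_ : Int) : Nat → Int → Int
  | 0, d => d
  | fuel + 1, d => if h_ ≤ totalFloorsA n d then d else minDropsGoA n h_ fuel (d + 1)

def min_drops (n : Int) (h_ : Int) : Int := minDropsGoA n h_ (h_.toNat + 1) 1

-- ===== PORT B =====
-- B's helper 'floors(d)': same sum, but breaking out as soon as total ≥ h.
def floorsGoB (h_ d : Int) : List Int → Int → Int
  | [], acc => acc
  | i :: rest, acc =>
    let acc' := acc + ((pyComb d.toNat i.toNat : Nat) : Int)
    if h_ ≤ acc' then acc' else floorsGoB h_ d rest acc'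

def floorsB (n h_ d : Int) : Int := floorsGoB h_ d (PySem.List.pyRange 1 (n + 1) 1) 0

-- 'while floors(hi) < h: hi *= 2'; fuel bounds the iterations only.
def growHiB (n h_ : Int) : Nat → Int → Int
  | 0, hi => hi
  | fuel + 1, hi => if floorsB n h_ hi < h_ then growHiB n h_ fuel (2 * hi) else hi

-- 'while lo < hi: mid = (lo+hi)//2; …'; fuel bounds the iterations only.
def bsearchB (n h_ : Int) : Nat → Int → Int → Int
  | 0, lo, _ => lo
  | fuel + 1, lo, hi =>
    if lo < hi then
      let mid := PySem.Int.floordiv (lo + hi) 2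
      if h_ ≤ floorsB n h_ mid then bsearchB n h_ fuel lo mid
      else bsearchB n h_ fuel (mid + 1) hi
    else lo

def min_drops_alt (n : Int) (h_ : Int) : Int :=
  let hi := growHiB n h_ (h_.toNat + 1) 1
  bsearchB n h_ (hi - 1).toNat 1 hi

-- ===== PRECONDITION & SPEC =====
-- Pre_ excludes exactly the inputs with n ≤ 0 < h, on which A (and B) loops forever:
-- the floor sum is the empty sum 0 there, never ≥ h.
def Pre_min_drops (n : Int) (h_ : Int) : Prop := 1 ≤ n ∨ h_ ≤ 0
instance (n : Int) (h_ : Int) : Decidable (Pre_min_drops n h_) := by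
  unfold Pre_min_drops; infer_instance

def pvWitness_min_drops : Int × Int := (3, 50)

def Spec_min_drops (n : Int) (h_ : Int) (out : Int) : Prop := out = min_drops_alt n h_
instance (n : Int) (h_ : Int) (out : Int) : Decidable (Spec_min_drops n h_ out) := by
  unfold Spec_min_drops; infer_instance

-- ===== CLAIM (what is proved, stated in full; the proofs are below) =====
def Claim_equal_min_drops : Prop := ∀ (n : Int) (h_ : Int), Dom_min_drops n h_ →
  Pre_min_drops n h_ → Spec_min_drops n h_ (min_drops n h_)

-- ===== LEMMAS AND PROOFS =====

theorem pyComb_eq_choose (d i : Nat) : pyComb d i = d.choose i := by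
  unfold pyComb
  split
  · exact (Nat.choose_eq_zero_of_lt (by omega)).symm
  · exact (Nat.choose_eq_descFactorial_div_factorial d i).symm

theorem total_eq_sum (n d : Int) :
    totalFloorsA n d =
      ((PySem.List.pyRange 1 (n + 1) 1).map
        (fun i => ((d.toNat.choose i.toNat : Nat) : Int))).sum := by
  unfold totalFloorsA
  rw [PySem.List.foldl_add]
  simp [pyComb_eq_choose]

theorem total_nonneg (n d : Int) : 0 ≤ totalFloorsA n d := by
  rw [total_eq_sum]
  apply List.sum_nonneg
  intro x hx
  simp only [List.mem_map] at hx
  obtain ⟨i, _, rfl⟩ := hx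
  positivity

theorem total_mono (n : Int) {d1 d2 : Int} (hle : d1 ≤ d2) :
    totalFloorsA n d1 ≤ totalFloorsA n d2 := by
  rw [total_eq_sum, total_eq_sum]
  apply List.sum_le_sum
  intro i _
  exact_mod_cast Nat.choose_le_choose i.toNat (Int.toNat_le_toNat hle)

theorem total_ge_self (n d : Int) (hn : 1 ≤ n) (hd : 1 ≤ d) :
    d ≤ totalFloorsA n d := by
  rw [total_eq_sum]
  have h1 : (1 : Int) ∈ PySem.List.pyRange 1 (n + 1) 1 := by
    rw [PySem.List.mem_pyRange_one]; omega
  have hmem : ((d.toNat.choose (1 : Int).toNat : Nat) : Int) ∈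
      (PySem.List.pyRange 1 (n + 1) 1).map
        (fun i => ((d.toNat.choose i.toNat : Nat) : Int)) :=
    List.mem_map_of_mem h1
  have := List.single_le_sum (l := (PySem.List.pyRange 1 (n + 1) 1).map
      (fun i => ((d.toNat.choose i.toNat : Nat) : Int)))
    (by intro x hx
        simp only [List.mem_map] at hx
        obtain ⟨i, _, rfl⟩ := hx
        positivity) _ hmem
  have h2 : ((d.toNat.choose (1 : Int).toNat : Nat) : Int) = d := by
    simp [Nat.choose_one_right]; omega
  omega

-- the early-breaking sum crosses the threshold h iff the full sum does
theorem floorsGo_ge_iff (h_ d : Int) :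
    ∀ (l : List Int) (acc : Int),
      (h_ ≤ floorsGoB h_ d l acc ↔
        h_ ≤ acc + (l.map (fun i => ((pyComb d.toNat i.toNat : Nat) : Int))).sum) := by
  intro l
  induction l with
  | nil => intro acc; simp [floorsGoB]
  | cons i rest ih =>
    intro acc
    simp only [floorsGoB, List.map_cons, List.sum_cons]
    by_cases hc : h_ ≤ acc + ((pyComb d.toNat i.toNat : Nat) : Int)
    · rw [if_pos hc]
      have hrest : (0 : Int) ≤
          (rest.map (fun i => ((pyComb d.toNat i.toNat : Nat) : Int))).sum := by
        apply List.sum_nonneg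
        intro x hx
        simp only [List.mem_map] at hx
        obtain ⟨j, _, rfl⟩ := hx
        positivity
      constructor
      · intro _; omega
      · intro _; exact hc
    · rw [if_neg hc, ih]
      constructor <;> (intro hx; omega)

theorem floorsB_ge_iff (n h_ d : Int) :
    h_ ≤ floorsB n h_ d ↔ h_ ≤ totalFloorsA n d := by
  unfold floorsB
  rw [floorsGo_ge_iff, total_eq_sum]
  simp [pyComb_eq_choose]

-- A's loop returns m when m is the least index ≥ d satisfying the test and fuel covers m - d.
theorem loopA_eq (n h_ : Int) (m : Int) :
    ∀ (fuel : Nat) (d : Int), d ≤ m → m ≤ d + fuel → h_ ≤ totalFloorsA n m →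
      (∀ e, d ≤ e → e < m → totalFloorsA n e < h_) →
      minDropsGoA n h_ fuel d = m := by
  intro fuel
  induction fuel with
  | zero =>
    intro d h1 h2 _ _
    have : d = m := by omega
    simp [minDropsGoA, this]
  | succ f ih =>
    intro d h1 h2 hm hmin
    by_cases hc : h_ ≤ totalFloorsA n d
    · have : d = m := by
        by_contra hne
        have : d < m := by omega
        exact absurd hc (not_le.mpr (hmin d le_rfl this))
      subst this
      simp only [minDropsGoA]
      rw [if_pos hc]
    · have hd : d < m := by
        rcases eq_or_lt_of_le h1 with h | h
        · exact absurd (h ▸ hm) hc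
        · exact h
      simp only [minDropsGoA, if_neg hc]
      exact ih (d + 1) (by omega) (by omega) hm
        (fun e he1 he2 => hmin e (by omega) he2)

theorem growHi_spec (n h_ : Int) :
    ∀ (fuel : Nat) (hi : Int), 1 ≤ hi → h_ ≤ totalFloorsA n ((2 : Int) ^ fuel * hi) →
      1 ≤ growHiB n h_ fuel hi ∧ h_ ≤ totalFloorsA n (growHiB n h_ fuel hi) := by
  intro fuel
  induction fuel with
  | zero =>
    intro hi h1 h2
    simp only [pow_zero, one_mul] at h2
    exact ⟨h1, h2⟩
  | succ f ih =>
    intro hi h1 h2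
    by_cases hc : floorsB n h_ hi < h_
    · simp only [growHiB, if_pos hc]
      apply ih (2 * hi) (by omega)
      have : (2 : Int) ^ f * (2 * hi) = (2 : Int) ^ (f + 1) * hi := by ring
      rw [this]; exact h2
    · simp only [growHiB, if_neg hc]
      exact ⟨h1, (floorsB_ge_iff n h_ hi).mp (not_lt.mp hc)⟩

theorem bsearch_eq (n h_ : Int) (m : Int)
    (hm : h_ ≤ totalFloorsA n m)
    (hmin : ∀ e, 1 ≤ e → e < m → totalFloorsA n e < h_) :
    ∀ (fuel : Nat) (lo hi : Int), 1 ≤ lo → lo ≤ m → m ≤ hi →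
      (hi - lo).toNat ≤ fuel → bsearchB n h_ fuel lo hi = m := by
  intro fuel
  induction fuel with
  | zero =>
    intro lo hi _ h2 h3 h4
    have : lo = m := by omega
    simp [bsearchB, this]
  | succ f ih =>
    intro lo hi hlo1 h2 h3 h4
    by_cases hlt : lo < hi
    · have hmid := PySem.Int.floordiv_two_mid_bounds (lo := lo) (hi := hi) (by omega)
      have hmidlt : PySem.Int.floordiv (lo + hi) 2 < hi := by
        rw [PySem.Int.floordiv_lt_iff_lt_mul (by omega)]; omega
      simp only [bsearchB]
      rw [if_pos hlt]
      set mid := PySem.Int.floordiv (lo + hi) 2 with hmiddef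
      by_cases hc : h_ ≤ floorsB n h_ mid
      · have hmle : m ≤ mid := by
          by_contra hgt
          rw [floorsB_ge_iff] at hc
          exact absurd hc (not_le.mpr (hmin mid (by omega) (by omega)))
        rw [if_pos hc]
        exact ih lo mid hlo1 h2 hmle (by omega)
      · have hmge : mid + 1 ≤ m := by
          by_contra hgt
          have hle : m ≤ mid := by omega
          have := total_mono n hle
          rw [floorsB_ge_iff] at hc
          exact hc (le_trans hm this)
        rw [if_neg hc]
        exact ih (mid + 1) hi (by omega) hmge h3 (by omega)
    · have h5 : lo = m := by omega
      have h6 : hi = m := by omega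
      simp [bsearchB, h5, h6]

-- existence of a witness drop count under Pre_
theorem exists_good (n h_ : Int) (hpre : Pre_min_drops n h_) :
    ∃ k : Nat, h_ ≤ totalFloorsA n (1 + (k : Int)) := by
  rcases hpre with hn | hh
  · refine ⟨((2 : Int) ^ (h_.toNat + 1) - 1).toNat, ?_⟩
    have hp1 : (1 : Int) ≤ (2 : Int) ^ (h_.toNat + 1) := by
      have : (0 : Int) < (2 : Int) ^ (h_.toNat + 1) := by positivity
      omega
    have heq : 1 + ((((2 : Int) ^ (h_.toNat + 1) - 1).toNat : Nat) : Int)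
        = (2 : Int) ^ (h_.toNat + 1) := by omega
    rw [heq]
    have hge := total_ge_self n ((2 : Int) ^ (h_.toNat + 1)) hn hp1
    have hlt : h_.toNat < 2 ^ (h_.toNat + 1) := by
      calc h_.toNat < 2 ^ h_.toNat := Nat.lt_two_pow_self
        _ ≤ 2 ^ (h_.toNat + 1) := Nat.pow_le_pow_right (by omega) (by omega)
    have : (h_.toNat : Int) < (2 : Int) ^ (h_.toNat + 1) := by exact_mod_cast hlt
    omega
  · exact ⟨0, le_trans hh (total_nonneg n 1)⟩

-- ===== VERDICT (by name: the statement is the Claim_ definition above) =====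
theorem min_drops_spec : Claim_equal_min_drops := by
  intro n h_ _ hpre
  unfold Spec_min_drops
  obtain hex := exists_good n h_ hpre
  classical
  set k0 := Nat.find hex with hk0
  set m := 1 + (k0 : Int) with hmdef
  have hm1 : 1 ≤ m := by omega
  have hm : h_ ≤ totalFloorsA n m := Nat.find_spec hex
  have hmin : ∀ e, 1 ≤ e → e < m → totalFloorsA n e < h_ := by
    intro e he1 he2
    have hke : (e - 1).toNat < k0 := by omega
    have := Nat.find_min hex hke
    have heq : 1 + (((e - 1).toNat : Nat) : Int) = e := by omega
    rw [heq] at this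
    omega
  have hle : ∀ e, 1 ≤ e → h_ ≤ totalFloorsA n e → m ≤ e := by
    intro e he1 he2
    by_contra hgt
    exact absurd he2 (not_le.mpr (hmin e he1 (by omega)))
  -- A's side
  have hmub : m ≤ 1 + ((h_.toNat + 1 : Nat) : Int) := by
    rcases hpre with hn | hh
    · by_cases hpos : 1 ≤ h_
      · have := hle h_ hpos (total_ge_self n h_ hn hpos)
        omega
      · have := hle 1 le_rfl (le_trans (by omega) (total_nonneg n 1))
        omega
    · have := hle 1 le_rfl (le_trans hh (total_nonneg n 1))
      omega
  have hA : min_drops n h_ = m := by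
    unfold min_drops
    exact loopA_eq n h_ m (h_.toNat + 1) 1 (by omega) (by omega) hm
      (fun e he1 he2 => hmin e he1 he2)
  -- B's side
  have hgrow : 1 ≤ growHiB n h_ (h_.toNat + 1) 1 ∧
      h_ ≤ totalFloorsA n (growHiB n h_ (h_.toNat + 1) 1) := by
    apply growHi_spec n h_ (h_.toNat + 1) 1 le_rfl
    rcases hpre with hn | hh
    · have hp1 : (1 : Int) ≤ (2 : Int) ^ (h_.toNat + 1) * 1 := by
        have : (0 : Int) < (2 : Int) ^ (h_.toNat + 1) := by positivity
        omega
      have hge := total_ge_self n _ hn hp1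
      have hlt : h_.toNat < 2 ^ (h_.toNat + 1) := by
        calc h_.toNat < 2 ^ h_.toNat := Nat.lt_two_pow_self
          _ ≤ 2 ^ (h_.toNat + 1) := Nat.pow_le_pow_right (by omega) (by omega)
      have : (h_.toNat : Int) < (2 : Int) ^ (h_.toNat + 1) := by exact_mod_cast hlt
      omega
    · exact le_trans hh (total_nonneg n _)
  have hB : min_drops_alt n h_ = m := by
    unfold min_drops_alt
    exact bsearch_eq n h_ m hm hmin (growHiB n h_ (h_.toNat + 1) 1 - 1).toNat
      1 _ le_rfl hm1 (hle _ hgrow.1 hgrow.2) le_rfl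
  rw [hA, hB]
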